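-- pv_equiv track=rewrite | github.com/csbobby/STAR_Benchmark | code/generation_tools/utils/split.py | split_by_temp
-- ===== SOURCE A (Python) =====
-- def split_by_temp(QA,return_dict=False):
--     qa_dict = {}
--     for qa in QA:
--         try:
--             qa_dict[qa['question_id'].split('_')[1]].append(qa)
--         except:
--             qa_dict[qa['question_id'].split('_')[1]] = [qa]
--     return qa_dict
-- ===== SOURCE B (Python) =====
-- def split_by_temp(QA, return_dict=False):
--     result = {}
--     rest = list(QA)
--     while rest:
--         k = rest[0]['question_id'].split('_')[1]
--         result[k] = [qa for qa in rest if qa['question_id'].split('_')[1] == k]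
--         rest = [qa for qa in rest if qa['question_id'].split('_')[1] != k]
--     return result
-- ===== Notes on version B (the rewrite author's own statement) =====
-- stated objective: alternative
-- what changed: Replaces the single-pass try/except hash-grouping with repeated partitioning: while items remain, take the temp key of the first remaining item, emit the group of all remaining items with that key, and keep only the rest; no exception handling and no dict mutation of existing entries.
import Mathlib
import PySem

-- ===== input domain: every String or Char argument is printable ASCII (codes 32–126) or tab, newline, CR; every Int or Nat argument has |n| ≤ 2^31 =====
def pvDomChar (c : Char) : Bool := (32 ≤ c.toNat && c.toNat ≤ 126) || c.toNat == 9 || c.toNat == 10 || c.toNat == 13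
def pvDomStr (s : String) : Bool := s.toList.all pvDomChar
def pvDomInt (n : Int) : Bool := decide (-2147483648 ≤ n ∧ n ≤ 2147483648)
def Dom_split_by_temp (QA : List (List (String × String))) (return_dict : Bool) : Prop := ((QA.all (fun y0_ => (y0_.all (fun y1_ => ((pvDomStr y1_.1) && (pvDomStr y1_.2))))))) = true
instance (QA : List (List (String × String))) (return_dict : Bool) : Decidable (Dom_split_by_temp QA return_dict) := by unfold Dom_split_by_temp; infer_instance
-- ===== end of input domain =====

-- B replaces A's single-pass try/except hash-grouping by repeated partitioning: peel off the
-- group of the first remaining key, recurse on the rest; same return value, an O(n*k) plan.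

-- shared key extraction qa['question_id'].split('_')[1]; total-with-default forms are used
-- because Pre_split_by_temp guarantees the key exists and the split has at least 2 parts
-- (where Python raises, the input is outside Pre_).
def pvKey (qa : List (String × String)) : String :=
  PySem.List.pyGetD ((PySem.Str.split? ((PySem.Dict.mk qa).getD "question_id" "") "_").getD []) 1 ""

-- ===== PORT A =====
-- the try/except body is exactly "qa_dict[k] = qa_dict.get(k, []) + [qa]" = Dict.modify k [] (· ++ [qa])
def split_by_temp (QA : List (List (String × String))) (return_dict : Bool) : List (String × List (List (String × String))) :=
  (QA.foldl (fun qa_dict qa => qa_dict.modify (pvKey qa) [] (fun g => g ++ [qa])) PySem.Dict.empty).items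

-- ===== PORT B =====
-- the while loop of Source B: 'rest' shrinks strictly (its head never satisfies the keep-predicate)
def pvBLoop (result : PySem.Dict String (List (List (String × String))))
    (rest : List (List (String × String))) : PySem.Dict String (List (List (String × String))) :=
  match rest with
  | [] => result
  | q :: tl =>
    pvBLoop (result.insert (pvKey q) ((q :: tl).filter (fun qa => pvKey qa == pvKey q)))
            ((q :: tl).filter (fun qa => !(pvKey qa == pvKey q)))
termination_by rest.length
decreasing_by
  simp only [List.filter_cons, beq_self_eq_true, Bool.not_true, if_neg, Bool.false_eq_true,
    not_false_eq_true]
  exact Nat.lt_succ_of_le (List.length_filter_le _ _)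

def split_by_temp_alt (QA : List (List (String × String))) (return_dict : Bool) : List (String × List (List (String × String))) :=
  (pvBLoop PySem.Dict.empty QA).items

-- ===== PRECONDITION & SPEC =====
-- Pre_ excludes exactly the inputs where Python A raises: a qa without a 'question_id' key
-- (KeyError) or whose question_id has no '_'-separated second part (IndexError).
def Pre_split_by_temp (QA : List (List (String × String))) (return_dict : Bool) : Prop :=
  (QA.all (fun qa =>
      (PySem.Dict.mk qa).contains "question_id" &&
      decide (2 ≤ ((PySem.Str.split? ((PySem.Dict.mk qa).getD "question_id" "") "_").getD []).length))) = true
instance (QA : List (List (String × String))) (return_dict : Bool) : Decidable (Pre_split_by_temp QA return_dict) := by unfold Pre_split_by_temp; infer_instance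

def pvWitness_split_by_temp : (List (List (String × String))) × Bool :=
  ([[("question_id", "a_1_x"), ("answer", "yes")], [("question_id", "b_2")], [("question_id", "c_1")]], false)

def Spec_split_by_temp (QA : List (List (String × String))) (return_dict : Bool) (out : List (String × List (List (String × String)))) : Prop := out = split_by_temp_alt QA return_dict
instance (QA : List (List (String × String))) (return_dict : Bool) (out : List (String × List (List (String × String)))) : Decidable (Spec_split_by_temp QA return_dict out) := by unfold Spec_split_by_temp; infer_instance

-- ===== CLAIM (what is proved, stated in full; the proofs are below) =====
def Claim_equal_split_by_temp : Prop := ∀ (QA : List (List (String × String))) (return_dict : Bool), Dom_split_by_temp QA return_dict → Pre_split_by_temp QA return_dict → Spec_split_by_temp QA return_dict (split_by_temp QA return_dict)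

-- ===== LEMMAS AND PROOFS =====

-- the common normal form both ports are reduced to: distinct keys in first-occurrence order,
-- each paired with the filter of QA by that key
def pvG (QA : List (List (String × String))) : List (String × List (List (String × String))) :=
  (PySem.List.dedup (QA.map pvKey)).map (fun k => (k, QA.filter (fun qa => pvKey qa == k)))

-- A's grouping fold has group pvKey·==k = filter
theorem pvGetD_group (QA : List (List (String × String))) (k : String) :
    (QA.foldl (fun d qa => d.modify (pvKey qa) [] (fun g => g ++ [qa])) PySem.Dict.empty).getD k []
      = QA.filter (fun qa => pvKey qa == k) := by
  have h := PySem.Dict.getD_foldl_modify_append (QA.map (fun qa => (pvKey qa, qa))) PySem.Dict.empty k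
  rw [List.foldl_map] at h
  simpa [List.filter_map, Function.comp_def] using h

theorem pvKeys_group (QA : List (List (String × String))) :
    (QA.foldl (fun d qa => d.modify (pvKey qa) [] (fun g => g ++ [qa])) PySem.Dict.empty).keys
      = PySem.Set.ofList (QA.map (fun qa => pvKey qa)) := by
  have h := PySem.Dict.keys_foldl_modify_key QA (fun qa => pvKey qa) []
      (fun _ qa g => g ++ [qa]) PySem.Dict.empty
  simpa [PySem.Set.update_nil_left] using h

-- A equals the normal form
theorem pvA_eq_G (QA : List (List (String × String))) (rd : Bool) :
    split_by_temp QA rd = pvG QA := by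
  unfold split_by_temp pvG
  have hnd : (QA.foldl (fun d qa => d.modify (pvKey qa) [] (fun g => g ++ [qa])) PySem.Dict.empty).keys.Nodup :=
    PySem.Dict.nodup_keys_foldl_modify_key QA (fun qa => pvKey qa) []
      (fun _ qa g => g ++ [qa]) PySem.Dict.empty (by simp)
  rw [PySem.Dict.items_eq_map_keys _ hnd [], pvKeys_group, PySem.List.dedup_eq_ofList]
  exact List.map_congr_left (fun k _ => by rw [pvGetD_group])

-- the normal form unfolds one partition step
theorem pvOfList_filter {α : Type} [BEq α] [LawfulBEq α] (p : α → Bool) (l : List α) :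
    PySem.Set.ofList (l.filter p) = (PySem.Set.ofList l).filter p := by
  induction l with
  | nil => rfl
  | cons x l ih =>
    by_cases hp : p x = true
    · rw [List.filter_cons_of_pos hp, PySem.Set.ofList_cons, PySem.Set.ofList_cons,
        PySem.Set.discard, PySem.Set.discard, ih, List.filter_cons_of_pos hp,
        List.filter_filter, List.filter_filter]
      congr 1
      exact List.filter_congr (fun a _ => by rw [Bool.and_comm])
    · rw [List.filter_cons_of_neg hp, PySem.Set.ofList_cons, List.filter_cons_of_neg hp,
        PySem.Set.discard, ih, List.filter_filter]
      exact (List.filter_congr (fun a _ => by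
        by_cases hx : (a == x) = true
        · have : a = x := eq_of_beq hx
          subst this
          simp [hp]
        · simp [hx])).symm

theorem pvMapFilter {α β : Type} (f : α → β) (p : β → Bool) (l : List α) :
    (l.filter (fun a => p (f a))).map f = (l.map f).filter p := by
  induction l with
  | nil => rfl
  | cons a l ih => by_cases h : p (f a) = true <;> simp [h, ih]

theorem pvG_cons (q : List (String × String)) (tl : List (List (String × String))) :
    pvG (q :: tl)
      = (pvKey q, (q :: tl).filter (fun qa => pvKey qa == pvKey q))
        :: pvG ((q :: tl).filter (fun qa => !(pvKey qa == pvKey q))) := by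
  have hrest : (q :: tl).filter (fun qa => !(pvKey qa == pvKey q))
      = tl.filter (fun qa => !(pvKey qa == pvKey q)) := by
    rw [List.filter_cons_of_neg (by simp)]
  unfold pvG
  rw [PySem.List.dedup_eq_ofList, PySem.List.dedup_eq_ofList, hrest,
    pvMapFilter pvKey (fun k => !(k == pvKey q)) tl, pvOfList_filter,
    List.map_cons, PySem.Set.ofList_cons, List.map_cons]
  congr 1
  rw [PySem.Set.discard]
  refine List.map_congr_left (fun k hk => ?_)
  have hkne : (!(k == pvKey q)) = true := by
    simpa using (List.mem_filter.mp hk).2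
  have hqk : (pvKey q == k) = false := by
    cases h : (pvKey q == k)
    · rfl
    · rw [← eq_of_beq h] at hkne
      simp at hkne
  congr 1
  rw [List.filter_cons_of_neg (by simp [hqk]), List.filter_filter]
  exact List.filter_congr (fun qa _ => by
    by_cases hx : (pvKey qa == k) = true
    · have hk0 : (pvKey qa == pvKey q) = false := by
        cases h : (pvKey qa == pvKey q)
        · rfl
        · rw [← eq_of_beq hx, h] at hkne
          simp at hkne
      simp [hx, hk0]
    · simp [hx])

theorem pvBLoop_items_aux (n : Nat) : ∀ (rest : List (List (String × String))),
    rest.length ≤ n → ∀ (d : PySem.Dict String (List (List (String × String)))),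
    d.keys.Nodup → (∀ qa ∈ rest, d.contains (pvKey qa) = false) →
    (pvBLoop d rest).items = d.items ++ pvG rest := by
  induction n with
  | zero =>
    intro rest hlen d _ _
    have : rest = [] := List.eq_nil_of_length_eq_zero (Nat.le_zero.mp hlen)
    subst this
    simp [pvBLoop, pvG, PySem.List.dedup]
  | succ n ih =>
    intro rest hlen d hnd h
    match rest with
    | [] => simp [pvBLoop, pvG, PySem.List.dedup]
    | q :: tl =>
      rw [pvBLoop]
      have hq : d.contains (pvKey q) = false := h q (by simp)
      have hrest' : ((q :: tl).filter (fun qa => !(pvKey qa == pvKey q))).length ≤ n := by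
        rw [List.filter_cons_of_neg (by simp)]
        exact le_trans (List.length_filter_le _ _) (Nat.le_of_succ_le_succ hlen)
      rw [ih _ hrest' _ (PySem.Dict.nodup_keys_insert _ _ _ hnd) ?_]
      · rw [PySem.Dict.items_insert_of_not_contains _ _ hq, pvG_cons, List.append_assoc,
          List.singleton_append]
      · intro qa hqa
        have h1 := List.mem_filter.mp hqa
        rw [PySem.Dict.contains_insert]
        have h2 : (pvKey qa == pvKey q) = false := by
          have := h1.2
          simpa using this
        rw [h2, h (qa) h1.1]
        rfl

theorem pvBLoop_items (rest : List (List (String × String)))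
    (d : PySem.Dict String (List (List (String × String))))
    (hnd : d.keys.Nodup)
    (h : ∀ qa ∈ rest, d.contains (pvKey qa) = false) :
    (pvBLoop d rest).items = d.items ++ pvG rest :=
  pvBLoop_items_aux rest.length rest le_rfl d hnd h

-- ===== VERDICT (by name: the statement is the Claim_ definition above) =====
theorem split_by_temp_spec : Claim_equal_split_by_temp := by
  intro QA rd _ _
  unfold Spec_split_by_temp split_by_temp_alt
  rw [pvA_eq_G, pvBLoop_items QA PySem.Dict.empty (by simp) (by simp [PySem.Dict.contains_empty])]
  simp [PySem.Dict.empty]
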